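-- pv_equiv track=rewrite | github.com/IamGauravS/Data-Structures-And-Algorithms | grokking-the-coding-interview/172-loud-and-rich.py | dfs
-- ===== SOURCE A (Python) =====
-- def dfs(i, res, visited, children, quiet):
--     if visited[i] == True:
--         return res[i]
--
--     visited[i] = True
--
--     for child in children[i]:
--         v = dfs(child, res, visited, children, quiet)
--         if quiet[v] < quiet[res[i]]:
--             res[i] = v
--
--     return res[i]
-- ===== SOURCE B (Python) =====
-- def dfs(i, res, visited, children, quiet):
--     # Iterative DFS: an explicit stack of (node, remaining-children) frames
--     # replaces the recursion; performs the same in-place updates of res/visited.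
--     stack = []            # frames: (node, list of children still to process)
--     call, pending = i, None
--     while True:
--         if call is not None:
--             j, call = call, None
--             if visited[j]:
--                 pending = res[j]
--             else:
--                 visited[j] = True
--                 stack.append((j, list(children[j])))
--                 pending = None
--         if not stack:
--             return pending
--         j, cs = stack[-1]
--         if pending is not None:
--             if quiet[pending] < quiet[res[j]]:
--                 res[j] = pending
--             pending = None
--         if cs:
--             stack[-1] = (j, cs[1:])
--             call = cs[0]
--         else:
--             stack.pop()
--             pending = res[j]
-- ===== Notes on version B (the rewrite author's own statement) =====
-- stated objective: alternative
-- what changed: The recursion is replaced by an iterative DFS driven by an explicit stack of (node, remaining-children) frames with a call/pending dispatch loop, performing the same in-place updates of res and visited.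
import Mathlib
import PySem

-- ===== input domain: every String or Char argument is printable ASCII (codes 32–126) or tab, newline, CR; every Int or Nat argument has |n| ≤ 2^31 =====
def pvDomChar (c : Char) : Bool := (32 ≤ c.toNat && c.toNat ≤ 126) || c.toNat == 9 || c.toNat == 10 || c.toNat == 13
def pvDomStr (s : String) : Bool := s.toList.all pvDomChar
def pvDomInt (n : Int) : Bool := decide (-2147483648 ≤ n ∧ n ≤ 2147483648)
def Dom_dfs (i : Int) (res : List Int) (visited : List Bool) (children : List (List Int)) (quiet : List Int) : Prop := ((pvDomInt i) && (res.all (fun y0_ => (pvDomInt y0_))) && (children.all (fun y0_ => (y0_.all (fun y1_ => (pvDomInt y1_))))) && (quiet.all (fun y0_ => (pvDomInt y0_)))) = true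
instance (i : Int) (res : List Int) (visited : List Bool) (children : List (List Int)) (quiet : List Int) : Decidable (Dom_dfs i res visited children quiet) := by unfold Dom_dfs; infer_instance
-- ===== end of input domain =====

-- B replaces A's recursion (which mutates res/visited in place; this file is about the
-- return value, and B performs the same in-place mutations) by an iterative DFS over an
-- explicit stack of (node, remaining-children) frames; objective: alternative decomposition.

-- ===== PORT A =====
-- index helpers shared by both ports: exact Python indexing (negative = from the end) on
-- in-range indices; the default is returned only where Python would raise IndexError,
-- which Pre_dfs excludes
def pvGetI (xs : List Int) (i : Int) : Int := (PySem.List.pyGet? xs i).getD 0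
def pvGetB (xs : List Bool) (i : Int) : Bool := (PySem.List.pyGet? xs i).getD true
def pvGetL (xs : List (List Int)) (i : Int) : List Int := (PySem.List.pyGet? xs i).getD []
def pvSetI (xs : List Int) (i : Int) (v : Int) : List Int := PySem.List.pySetD xs i v
def pvSetB (xs : List Bool) (i : Int) : List Bool := PySem.List.pySetD xs i true

-- A's recursion, state (res, visited) threaded explicitly; the fuel
-- 'visited.count false + 1' is a totality device only: each nested call marks one more
-- node visited, so it bounds the recursion depth and is never exhausted on Pre_ inputs
mutual
def dfsA (ch : List (List Int)) (q : List Int) : Nat → Int → List Int × List Bool → Int × (List Int × List Bool)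
  | 0, _, st => (0, st)
  | f+1, i, (res, vis) =>
    if pvGetB vis i then (pvGetI res i, (res, vis))
    else
      let st1 := loopA ch q f (pvGetL ch i) i (res, pvSetB vis i)
      (pvGetI st1.1 i, st1)
termination_by f _ _ => (f, 0)
def loopA (ch : List (List Int)) (q : List Int) : Nat → List Int → Int → List Int × List Bool → List Int × List Bool
  | _, [], _, st => st
  | f, c :: cs, i, st =>
    let r := dfsA ch q f c st
    let res1 := if pvGetI q r.1 < pvGetI q (pvGetI r.2.1 i) then pvSetI r.2.1 i r.1 else r.2.1
    loopA ch q f cs i (res1, r.2.2)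
termination_by f cs _ _ => (f, cs.length + 1)
end

def dfs (i : Int) (res : List Int) (visited : List Bool) (children : List (List Int)) (quiet : List Int) : Int :=
  (dfsA children quiet (visited.count false + 1) i (res, visited)).1

-- ===== PORT B =====
-- Source B's while-loop: mode '.inl j' = the variable call holds j, mode '.inr v?' = call is
-- None and pending = v?; the stack holds (node, remaining-children) frames; same fuel
-- device as in the port of A (one unit per marking of a node), never exhausted on Pre_ inputs
-- the update Source B performs when a finished call hands value 'pending' to the top frame
def upd (q : List Int) (j : Int) (v? : Option Int) (res : List Int) : List Int :=
  match v? with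
  | some v => if pvGetI q v < pvGetI q (pvGetI res j) then pvSetI res j v else res
  | none => res

def runM (ch : List (List Int)) (q : List Int) : Nat → Int ⊕ Option Int → List (Int × List Int) → List Int × List Bool → Int
  | f, .inl j, stack, (res, vis) =>
    if pvGetB vis j then runM ch q f (.inr (some (pvGetI res j))) stack (res, vis)
    else
      match f with
      | 0 => 0
      | g+1 => runM ch q g (.inr none) ((j, pvGetL ch j) :: stack) (res, pvSetB vis j)
  | f, .inr v?, stack, (res, vis) =>
    match stack with
    | [] => v?.getD 0
    | (j, cs) :: rest =>
      let res1 := upd q j v? res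
      match cs with
      | [] => runM ch q f (.inr (some (pvGetI res1 j))) rest (res1, vis)
      | c :: cs' => runM ch q f (.inl c) ((j, cs') :: rest) (res1, vis)
termination_by f mode stack _ =>
  (f, (stack.map (fun p => p.2.length)).sum, stack.length,
   match mode with | .inl _ => 1 | .inr _ => 0)

def dfs_alt (i : Int) (res : List Int) (visited : List Bool) (children : List (List Int)) (quiet : List Int) : Int :=
  runM children quiet (visited.count false + 1) (.inl i) [] (res, visited)

-- ===== PRECONDITION & SPEC =====
-- Graph reachability over the INPUT (not a run of either port): starting from i, a node
-- expands to its children exactly when its INITIAL visited flag is False; iterating the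
-- step once per candidate index saturates, giving the set of nodes the traversal touches.
def pvReachStep (vis : List Bool) (ch : List (List Int)) (seen : List Int) : List Int :=
  seen ++ (((seen.filter (fun j => PySem.List.pyGet? vis j = some false)).flatMap
      (fun j => (PySem.List.pyGet? ch j).getD [])).filter (fun c => !(seen.contains c))).dedup
def pvReach (vis : List Bool) (ch : List (List Int)) (i : Int) (fuel : Nat) : List Int :=
  (pvReachStep vis ch)^[fuel] [i]

-- Pre_dfs = exactly the inputs on which the Python A returns (no IndexError): either the
-- two shallow cases that touch only visited[i]/res[i] (i already visited, or unvisited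
-- with no children), or: every node reachable from i (graph reachability above) has its
-- visited/res entries in Python range, its children entry in range if initially
-- unvisited, and its initial res value in range as an index into quiet — precisely the
-- list accesses the traversal performs.
def Pre_dfs (i : Int) (res : List Int) (visited : List Bool) (children : List (List Int)) (quiet : List Int) : Prop :=
  (PySem.List.pyGet? visited i = some true ∧ PySem.Raise.InRange res.length i)
  ∨ (PySem.List.pyGet? visited i = some false ∧ PySem.List.pyGet? children i = some [] ∧
     PySem.Raise.InRange res.length i)
  ∨ (∀ j ∈ pvReach visited children i (i :: children.flatten).length,
       PySem.Raise.InRange visited.length j ∧ PySem.Raise.InRange res.length j ∧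
       (PySem.List.pyGet? visited j = some false → PySem.Raise.InRange children.length j) ∧
       PySem.Raise.InRange quiet.length ((PySem.List.pyGet? res j).getD 0))
instance (i : Int) (res : List Int) (visited : List Bool) (children : List (List Int)) (quiet : List Int) : Decidable (Pre_dfs i res visited children quiet) := by unfold Pre_dfs; infer_instance

def pvWitness_dfs : Int × List Int × List Bool × List (List Int) × List Int :=
  (0, [0, 1], [false, false], [[1], [0]], [3, 1])

def Spec_dfs (i : Int) (res : List Int) (visited : List Bool) (children : List (List Int)) (quiet : List Int) (out : Int) : Prop := out = dfs_alt i res visited children quiet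
instance (i : Int) (res : List Int) (visited : List Bool) (children : List (List Int)) (quiet : List Int) (out : Int) : Decidable (Spec_dfs i res visited children quiet out) := by unfold Spec_dfs; infer_instance

-- ===== CLAIM (what is proved, stated in full; the proofs are below) =====
def Claim_equal_dfs : Prop := ∀ (i : Int) (res : List Int) (visited : List Bool) (children : List (List Int)) (quiet : List Int), Dom_dfs i res visited children quiet → Pre_dfs i res visited children quiet → Spec_dfs i res visited children quiet (dfs i res visited children quiet)

-- ===== LEMMAS AND PROOFS =====

theorem count_false_set (l : List Bool) (k : Nat) (hk : k < l.length) (hv : l[k]? = some false) :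
    (l.set k true).count false + 1 = l.count false := by
  induction l generalizing k with
  | nil => simp at hk
  | cons a l ih =>
    cases k with
    | zero =>
      simp at hv
      simp [hv]
    | succ k =>
      simp at hk hv
      have := ih k hk hv
      simp [List.count_cons]
      omega

theorem pvGetB_false {vis : List Bool} {j : Int} (h : pvGetB vis j = false) :
    ∃ k, k < vis.length ∧ vis[k]? = some false ∧ pvSetB vis j = vis.set k true := by
  unfold pvGetB PySem.List.pyGet? at h
  unfold pvSetB PySem.List.pySetD PySem.List.pySet?
  unfold PySem.List.pyIdx? at h ⊢
  split_ifs at h ⊢ with h1 h2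
  · simp only [Option.bind_some] at h
    refine ⟨j.toNat, ?_, ?_, by simp⟩ <;>
      rcases hg : vis[j.toNat]? with _ | b <;> rw [hg] at h <;> simp_all
  · simp at h
  · simp only [Option.bind_some] at h
    refine ⟨vis.length - (-j).toNat, ?_, ?_, by simp⟩ <;>
      rcases hg : vis[vis.length - (-j).toNat]? with _ | b <;> rw [hg] at h <;> simp_all <;> omega
  · simp at h

theorem cf_setB {vis : List Bool} {j : Int} (h : pvGetB vis j = false) :
    (pvSetB vis j).count false + 1 = vis.count false := by
  obtain ⟨k, hk, hv, hs⟩ := pvGetB_false h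
  rw [hs]
  exact count_false_set vis k hk hv

theorem fuel_step (ch : List (List Int)) (q : List Int) : ∀ f : Nat,
    (∀ i res vis, vis.count false < f →
      dfsA ch q (f+1) i (res, vis) = dfsA ch q f i (res, vis) ∧
      (dfsA ch q f i (res, vis)).2.2.count false ≤ vis.count false) ∧
    (∀ cs i res vis, vis.count false < f →
      loopA ch q (f+1) cs i (res, vis) = loopA ch q f cs i (res, vis) ∧
      (loopA ch q f cs i (res, vis)).2.count false ≤ vis.count false) := by
  intro f
  induction f with
  | zero => exact ⟨fun _ _ _ h => absurd h (by omega), fun _ _ _ _ h => absurd h (by omega)⟩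
  | succ g ih =>
    have Hd : ∀ i res vis, vis.count false < g + 1 →
        dfsA ch q (g+1+1) i (res, vis) = dfsA ch q (g+1) i (res, vis) ∧
        (dfsA ch q (g+1) i (res, vis)).2.2.count false ≤ vis.count false := by
      intro i res vis h
      by_cases hv : pvGetB vis i = true
      · constructor <;> simp [dfsA, hv]
      · rw [Bool.not_eq_true] at hv
        have hc := cf_setB hv
        have h1 : (pvSetB vis i).count false < g := by omega
        have hl := ih.2 (pvGetL ch i) i res (pvSetB vis i) h1
        constructor
        · simp only [dfsA, hv, Bool.false_eq_true, if_false]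
          rw [hl.1]
        · simp only [dfsA, hv, Bool.false_eq_true, if_false]
          have := hl.2
          omega
    refine ⟨Hd, ?_⟩
    intro cs
    induction cs with
    | nil => intro i res vis _; constructor <;> simp [loopA]
    | cons c cs ihc =>
      intro i res vis h
      have hd := Hd c res vis h
      have hmono : (dfsA ch q (g+1) c (res, vis)).2.2.count false ≤ vis.count false := hd.2
      have hrec := ihc i
        (if pvGetI q (dfsA ch q (g+1) c (res, vis)).1 <
            pvGetI q (pvGetI (dfsA ch q (g+1) c (res, vis)).2.1 i)
         then pvSetI (dfsA ch q (g+1) c (res, vis)).2.1 i (dfsA ch q (g+1) c (res, vis)).1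
         else (dfsA ch q (g+1) c (res, vis)).2.1)
        (dfsA ch q (g+1) c (res, vis)).2.2 (by omega)
      constructor
      · simp only [loopA]
        rw [hd.1, hrec.1]
      · simp only [loopA]
        have := hrec.2
        omega

theorem loopA_add (ch : List (List Int)) (q : List Int) (f d : Nat) (cs : List Int) (i : Int)
    (res : List Int) (vis : List Bool) (h : vis.count false < f) :
    loopA ch q (f + d) cs i (res, vis) = loopA ch q f cs i (res, vis) := by
  induction d with
  | zero => rfl
  | succ d ihd =>
    have := ((fuel_step ch q (f + d)).2 cs i res vis (by omega)).1
    calc loopA ch q (f + (d+1)) cs i (res, vis) = loopA ch q (f + d + 1) cs i (res, vis) := by ring_nf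
      _ = loopA ch q (f + d) cs i (res, vis) := this
      _ = loopA ch q f cs i (res, vis) := ihd

theorem loopA_irrel (ch : List (List Int)) (q : List Int) {f f' : Nat} (cs : List Int) (i : Int)
    (res : List Int) (vis : List Bool) (h : vis.count false < f) (h' : vis.count false < f') :
    loopA ch q f cs i (res, vis) = loopA ch q f' cs i (res, vis) := by
  rcases Nat.le_total f f' with hle | hle
  · obtain ⟨d, rfl⟩ := Nat.exists_eq_add_of_le hle
    exact (loopA_add ch q f d cs i res vis h).symm
  · obtain ⟨d, rfl⟩ := Nat.exists_eq_add_of_le hle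
    exact loopA_add ch q f' d cs i res vis h'

theorem loopA_mono (ch : List (List Int)) (q : List Int) {f : Nat} (cs : List Int) (i : Int)
    (res : List Int) (vis : List Bool) (h : vis.count false < f) :
    (loopA ch q f cs i (res, vis)).2.count false ≤ vis.count false :=
  ((fuel_step ch q f).2 cs i res vis h).2

-- the recursive computation a machine stack still has to perform: each frame (j, cs)
-- finishes loopA over cs for node j, then hands res[j] to the frame below
def unwind (ch : List (List Int)) (q : List Int) (f : Nat) : List (Int × List Int) → Option Int × (List Int × List Bool) → Int
  | [], p => p.1.getD 0
  | (j, cs) :: rest, (v?, (res, vis)) =>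
    let res1 := upd q j v? res
    let st1 := loopA ch q f cs j (res1, vis)
    unwind ch q f rest (some (pvGetI st1.1 j), st1)

theorem unwind_irrel (ch : List (List Int)) (q : List Int) {f f' : Nat}
    (stack : List (Int × List Int)) (v? : Option Int) (res : List Int) (vis : List Bool)
    (h : vis.count false < f) (h' : vis.count false < f') :
    unwind ch q f stack (v?, (res, vis)) = unwind ch q f' stack (v?, (res, vis)) := by
  induction stack generalizing v? res vis with
  | nil => rfl
  | cons p rest ih =>
    obtain ⟨j, cs⟩ := p
    simp only [unwind]
    rw [loopA_irrel ch q cs j _ vis h h']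
    have hm := loopA_mono ch q cs j (upd q j v? res) vis h'
    exact ih _ _ _ (by omega) (by omega)

theorem unwind_cons_nil (ch : List (List Int)) (q : List Int) (f : Nat) (j : Int)
    (rest : List (Int × List Int)) (v? : Option Int) (res : List Int) (vis : List Bool) :
    unwind ch q f ((j, []) :: rest) (v?, (res, vis)) =
    unwind ch q f rest (some (pvGetI (upd q j v? res) j), (upd q j v? res, vis)) := by
  simp only [unwind, loopA]

theorem unwind_cons_cons (ch : List (List Int)) (q : List Int) (f : Nat) (j c : Int)
    (cs' : List Int) (rest : List (Int × List Int)) (v? : Option Int) (res : List Int)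
    (vis : List Bool) :
    unwind ch q f ((j, c :: cs') :: rest) (v?, (res, vis)) =
    unwind ch q f ((j, cs') :: rest)
      (some (dfsA ch q f c (upd q j v? res, vis)).1,
       (dfsA ch q f c (upd q j v? res, vis)).2) := by
  rcases hE : dfsA ch q f c (upd q j v? res, vis) with ⟨rv, rres, rvis⟩
  dsimp only
  simp only [unwind, loopA]
  rw [hE]
  dsimp only
  simp only [upd]

theorem sim (ch : List (List Int)) (q : List Int) :
    ∀ (f : Nat) (mode : Int ⊕ Option Int) (stack : List (Int × List Int)) (st : List Int × List Bool),
      st.2.count false < f →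
      runM ch q f mode stack st = Sum.elim
        (fun j => unwind ch q f stack (some (dfsA ch q f j st).1, (dfsA ch q f j st).2))
        (fun v? => unwind ch q f stack (v?, st)) mode := by
  intro f mode stack st
  induction f, mode, stack, st using runM.induct ch q with
  | case1 f j stack res vis hv ih =>
    intro h
    rw [Sum.elim_inl, runM.eq_def]
    simp only [hv, if_true]
    rw [ih h, Sum.elim_inr]
    obtain ⟨g, rfl⟩ : ∃ g, f = g + 1 := ⟨f - 1, by omega⟩
    simp [dfsA, hv]
  | case2 j stack res vis hv =>
    intro h
    omega
  | case3 j stack res vis hv g ih =>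
    intro h
    replace h : vis.count false < g + 1 := h
    rw [Bool.not_eq_true] at hv
    have hc := cf_setB hv
    have h1 : (pvSetB vis j).count false < g := by omega
    rw [Sum.elim_inl, runM.eq_def]
    simp only [hv, Bool.false_eq_true, if_false]
    rw [ih h1, Sum.elim_inr]
    simp only [unwind, upd, dfsA, hv, Bool.false_eq_true, if_false]
    have hm : (loopA ch q g (pvGetL ch j) j (res, pvSetB vis j)).2.count false ≤
        (pvSetB vis j).count false :=
      loopA_mono ch q (pvGetL ch j) j res (pvSetB vis j) h1
    exact unwind_irrel ch q stack _ _ _ (by omega) (by omega)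
  | case4 f v? res vis =>
    intro h
    rw [Sum.elim_inr, runM.eq_def]
    cases v? <;> simp [unwind]
  | case5 f v? res vis j rest res1 ih =>
    intro h
    rw [Sum.elim_inr, runM.eq_def]
    simp only []
    rw [ih h, Sum.elim_inr]
    exact (unwind_cons_nil ch q f j rest v? res vis).symm
  | case6 f v? res vis j rest res1 c cs' ih =>
    intro h
    rw [Sum.elim_inr, runM.eq_def]
    simp only []
    rw [ih h, Sum.elim_inl]
    exact (unwind_cons_cons ch q f j c cs' rest v? res vis).symm

theorem main_eq (i : Int) (res : List Int) (visited : List Bool)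
    (children : List (List Int)) (quiet : List Int) :
    dfs i res visited children quiet = dfs_alt i res visited children quiet := by
  unfold dfs dfs_alt
  rw [sim children quiet (visited.count false + 1) (.inl i) [] (res, visited) (by simp)]
  rw [Sum.elim_inl]
  simp [unwind]

-- ===== VERDICT (by name: the statement is the Claim_ definition above) =====
theorem dfs_spec : Claim_equal_dfs := by
  intro i res visited children quiet _ _
  unfold Spec_dfs
  exact main_eq i res visited children quiet
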